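-- pv_equiv track=rewrite | github.com/primetime00/memory_hack | app/scripts/trend/trend_calculator.py | find_trends
-- ===== SOURCE A (Python) =====
-- def find_trends(data: list):
--     tl = []
--     ol = data.copy()
--     while True:
--         if len(ol) <= 1:
--             return tl
--         elif len(ol) == 2:
--             if ol[0] == ol[1]:
--                 tl.append('flat')
--             elif ol[0] > ol[1]:
--                 tl.append('down')
--             else:
--                 tl.append('up')
--             return tl
--         else:
--             if ol[0] == ol[1]: #flat
--                 tl.append('flat')
--                 try:
--                     res = ol.index(list(filter(lambda i: i != ol[0], ol))[0])
--                 except IndexError: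
--                     return tl
--                 ol = ol[res-1:]
--             elif ol[0] < ol[1]: #incline or up
--                 if ol[1] < ol[2]: #this is an incline
--                     tl.append('incline')
--                     res = 0
--                     for i in range(0, len(ol) - 1):
--                         if ol[i + 1] > ol[i]:
--                             res += 1
--                         else:
--                             break
--                     ol = ol[res:]
--                 else: #spike up ol[2] == ol[1] or ol[2] < ol[1]
--                     tl.append('up')
--                     ol.pop(0)
--             elif ol[0] > ol[1]: #decline or down
--                 if ol[1] > ol[2]: #this is an decline
--                     tl.append('decline')
--                     res = 0
--                     for i in range(0, len(ol)-1):
--                         if ol[i+1] < ol[i]: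
--                             res += 1
--                         else:
--                             break
--                     ol = ol[res:]
--                 else: #spike down ol[2] == ol[1] or ol[2] > ol[1]
--                     tl.append('down')
--                     ol.pop(0)
-- ===== SOURCE B (Python) =====
-- def find_trends(data: list):
--     # Single pass: run-length-encode the adjacent comparison signs, then name each run.
--     out = []
--     run_sym = None
--     run_len = 0
--     for x, y in zip(data, data[1:]):
--         s = '=' if x == y else ('<' if x < y else '>')
--         if s == run_sym:
--             run_len += 1
--         else:
--             if run_sym is not None:
--                 out.append(_name(run_sym, run_len))
--             run_sym = s
--             run_len = 1
--     if run_sym is not None: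
--         out.append(_name(run_sym, run_len))
--     return out
--
-- def _name(sym, length):
--     if sym == '=':
--         return 'flat'
--     if sym == '<':
--         return 'incline' if length >= 2 else 'up'
--     return 'decline' if length >= 2 else 'down'
-- ===== Notes on version B (the rewrite author's own statement) =====
-- stated objective: faster
-- what changed: Replaces the quadratic while-loop over repeatedly sliced/popped copies of the list (with list.index and filter rescans) by a single O(n) pass that run-length-encodes the adjacent comparison signs (=,<,>) and names each run (flat; incline/up; decline/down by run length).
import Mathlib
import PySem

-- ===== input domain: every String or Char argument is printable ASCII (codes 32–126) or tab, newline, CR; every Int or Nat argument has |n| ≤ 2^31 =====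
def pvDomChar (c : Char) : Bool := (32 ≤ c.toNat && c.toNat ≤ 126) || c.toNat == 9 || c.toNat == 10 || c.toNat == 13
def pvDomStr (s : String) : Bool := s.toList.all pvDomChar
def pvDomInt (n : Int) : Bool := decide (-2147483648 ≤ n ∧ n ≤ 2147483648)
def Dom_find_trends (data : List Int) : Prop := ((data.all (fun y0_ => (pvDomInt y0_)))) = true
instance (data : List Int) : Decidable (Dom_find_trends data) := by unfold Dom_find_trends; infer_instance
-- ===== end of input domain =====

-- B replaces A's quadratic slice/pop/index re-scanning loop by one O(n) pass that
-- run-length-encodes the adjacent comparison signs and names each run (objective: faster).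


-- ===== PORT A =====
-- res-counting loop of the incline branch: res += 1 while ol[i+1] > ol[i], else break
def incRunA : List Int → Nat
  | a :: b :: r => if b > a then incRunA (b :: r) + 1 else 0
  | _ => 0

-- res-counting loop of the decline branch
def decRunA : List Int → Nat
  | a :: b :: r => if b < a then decRunA (b :: r) + 1 else 0
  | _ => 0

-- the while-True loop; fuel only makes the recursion obviously terminating
-- (each iteration shortens ol by at least 1, so data.length + 1 fuel is never exhausted)
def goA : Nat → List String → List Int → List String
  | 0, tl, _ => tl
  | _ + 1, tl, [] => tl
  | _ + 1, tl, [_] => tl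
  | _ + 1, tl, [a, b] =>
      if a = b then tl ++ ["flat"] else if a > b then tl ++ ["down"] else tl ++ ["up"]
  | fuel + 1, tl, a :: b :: c :: rest =>
      if a = b then
        -- flat: res = ol.index(first element ≠ ol[0]); IndexError (filter empty) → return
        match ((a :: b :: c :: rest).filter (fun i => i != a)).head? with
        | none => tl ++ ["flat"]
        | some v =>
          match PySem.List.index? (a :: b :: c :: rest) v with
          | none => tl ++ ["flat"]  -- unreachable: v is an element of the list
          | some res =>
              goA fuel (tl ++ ["flat"])
                (PySem.List.slice (a :: b :: c :: rest) (some ((res : Int) - 1)) none)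
      else if a < b then
        if b < c then
          goA fuel (tl ++ ["incline"])
            (PySem.List.slice (a :: b :: c :: rest)
              (some ((incRunA (a :: b :: c :: rest) : Int))) none)
        else goA fuel (tl ++ ["up"]) (b :: c :: rest)  -- ol.pop(0)
      else  -- ol[0] > ol[1] (trichotomy)
        if b > c then
          goA fuel (tl ++ ["decline"])
            (PySem.List.slice (a :: b :: c :: rest)
              (some ((decRunA (a :: b :: c :: rest) : Int))) none)
        else goA fuel (tl ++ ["down"]) (b :: c :: rest)  -- ol.pop(0)

def find_trends (data : List Int) : List String := goA (data.length + 1) [] data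

-- ===== PORT B =====
def pvSym (x y : Int) : Char := if x = y then '=' else if x < y then '<' else '>'

def pvName (s : Char) (len : Nat) : String :=
  if s = '=' then "flat"
  else if s = '<' then (if len ≥ 2 then "incline" else "up")
  else (if len ≥ 2 then "decline" else "down")

-- the for-loop of Source B: state = current run (symbol, length), out = emitted names
def goB : List (Int × Int) → Option (Char × Nat) → List String → List String
  | [], none, out => out
  | [], some (c, k), out => out ++ [pvName c k]
  | (x, y) :: ps, st, out =>
      let s := pvSym x y
      match st with
      | some (c, k) =>
          if s = c then goB ps (some (c, k + 1)) out
          else goB ps (some (s, 1)) (out ++ [pvName c k])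
      | none => goB ps (some (s, 1)) out

def find_trends_alt (data : List Int) : List String :=
  goB (data.zip (data.drop 1)) none []

-- ===== PRECONDITION & SPEC =====
def Spec_find_trends (data : List Int) (out : List String) : Prop := out = find_trends_alt data
instance (data : List Int) (out : List String) : Decidable (Spec_find_trends data out) := by unfold Spec_find_trends; infer_instance

-- ===== CLAIM (what is proved, stated in full; the proofs are below) =====
def Claim_equal_find_trends : Prop := ∀ (data : List Int), Dom_find_trends data → Spec_find_trends data (find_trends data)

-- ===== LEMMAS AND PROOFS =====

-- the comparison-sign sequence of a list (spec notion shared by both proofs)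
def symsS : List Int → List Char
  | a :: b :: r => pvSym a b :: symsS (b :: r)
  | _ => []

-- leading-run length of a symbol
def clS (c : Char) : List Char → Nat
  | [] => 0
  | s :: ss => if s = c then clS c ss + 1 else 0

-- run-length encoding with names (spec form of B)
def rleChunk (c : Char) (k : Nat) : List Char → List String
  | [] => [pvName c k]
  | s :: ss => if s = c then rleChunk c (k + 1) ss else pvName c k :: rleChunk s 1 ss

def rle : List Char → List String
  | [] => []
  | s :: ss => rleChunk s 1 ss

-- leading count of elements equal to v
def cntEq (v : Int) : List Int → Nat
  | [] => 0
  | x :: xs => if x = v then cntEq v xs + 1 else 0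

theorem goB_chunk (ps : List (Int × Int)) :
    ∀ c k out, goB ps (some (c, k)) out = out ++ rleChunk c k (ps.map fun p => pvSym p.1 p.2) := by
  induction ps with
  | nil => intro c k out; simp [goB, rleChunk]
  | cons p ps ih =>
    intro c k out
    obtain ⟨x, y⟩ := p
    by_cases h : pvSym x y = c
    · simp [goB, h, rleChunk, ih]
    · simp [goB, h, rleChunk, ih]

theorem zip_map_sym : ∀ l : List Int,
    ((l.zip (l.drop 1)).map fun p => pvSym p.1 p.2) = symsS l
  | [] => by simp [symsS]
  | [a] => by simp [symsS]
  | a :: b :: r => by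
      have := zip_map_sym (b :: r)
      simpa [symsS] using this

theorem alt_eq_rle (data : List Int) : find_trends_alt data = rle (symsS data) := by
  match data with
  | [] => simp [find_trends_alt, goB, rle, symsS]
  | [a] => simp [find_trends_alt, goB, rle, symsS]
  | a :: b :: r =>
    show goB ((a, b) :: (b :: r).zip ((b :: r).drop 1)) none [] = _
    simp only [goB, goB_chunk, zip_map_sym, symsS, rle]
    simp

theorem rleChunk_eq : ∀ (ss : List Char) (c : Char) (k : Nat),
    rleChunk c k ss = pvName c (k + clS c ss) :: rle (ss.drop (clS c ss))
  | [], c, k => by simp [rleChunk, clS, rle]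
  | s :: ss, c, k => by
    by_cases h : s = c
    · subst h
      have := rleChunk_eq ss s (k + 1)
      simp only [rleChunk, clS, this]
      rw [show k + 1 + clS s ss = k + (clS s ss + 1) by omega]
      simp
    · simp [rleChunk, clS, h, rle]

theorem symsS_drop : ∀ (k : Nat) (l : List Int), symsS (l.drop k) = (symsS l).drop k := by
  intro k
  induction k with
  | zero => simp
  | succ k ih =>
    intro l
    match l with
    | [] => simp [symsS]
    | [a] => simp [symsS]
    | a :: b :: r =>
      show symsS ((b :: r).drop k) = (pvSym a b :: symsS (b :: r)).drop (k + 1)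
      simp [ih (b :: r)]

theorem length_symsS : ∀ (a : Int) (t : List Int), (symsS (a :: t)).length = t.length
  | _, [] => by simp [symsS]
  | a, b :: t => by simp [symsS, length_symsS b t]

theorem clS_eq_syms : ∀ (t : List Int) (a : Int), clS '=' (symsS (a :: t)) = cntEq a t
  | [], a => by simp [symsS, clS, cntEq]
  | b :: t, a => by
    by_cases h : a = b
    · subst h
      simp [symsS, clS, cntEq, pvSym, clS_eq_syms t a]
    · have hs : pvSym a b ≠ '=' := by
        simp only [pvSym, if_neg h]
        split <;> decide
      simp [symsS, clS, hs, cntEq, Ne.symm h]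

theorem incRunA_eq : ∀ l : List Int, incRunA l = clS '<' (symsS l)
  | [] => by simp [incRunA, symsS, clS]
  | [a] => by simp [incRunA, symsS, clS]
  | a :: b :: r => by
    by_cases h : a < b
    · have hs : pvSym a b = '<' := by simp [pvSym, h, ne_of_lt h]
      simp [incRunA, symsS, clS, h, hs, incRunA_eq (b :: r)]
    · have hs : pvSym a b ≠ '<' := by
        unfold pvSym
        split_ifs <;> decide
      simp [incRunA, symsS, clS, h, hs]

theorem decRunA_eq : ∀ l : List Int, decRunA l = clS '>' (symsS l)
  | [] => by simp [decRunA, symsS, clS]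
  | [a] => by simp [decRunA, symsS, clS]
  | a :: b :: r => by
    by_cases h : b < a
    · have hs : pvSym a b = '>' := by
        simp [pvSym, Int.ne_of_gt h, Int.not_lt.mpr (Int.le_of_lt h)]
      simp [decRunA, symsS, clS, h, hs, decRunA_eq (b :: r)]
    · have hs : pvSym a b ≠ '>' := by
        unfold pvSym
        split_ifs <;> first | decide | omega
      simp [decRunA, symsS, clS, h, hs]

theorem index_filter_lemma : ∀ (l : List Int) (v w : Int),
    (l.filter (fun i => i != v)).head? = some w →
    PySem.List.index? l w = some (cntEq v l) := by
  intro l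
  induction l with
  | nil => intro v w h; simp at h
  | cons x xs ih =>
    intro v w h
    by_cases hx : x = v
    · have hcons : (x :: xs).filter (fun i => i != v) = xs.filter (fun i => i != v) := by
        simp [hx]
      rw [hcons] at h
      have hw : PySem.List.index? xs w = some (cntEq v xs) := ih v w h
      obtain ⟨t, ht⟩ := List.head?_eq_some_iff.mp h
      have hmem : w ∈ xs.filter (fun i => i != v) := ht ▸ List.mem_cons_self ..
      have hwv : w ≠ v := by simpa using (List.mem_filter.mp hmem).2
      have hxw : x ≠ w := by rw [hx]; exact fun he => hwv he.symm
      rw [PySem.List.index?_cons_of_ne _ hxw, hw]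
      simp [cntEq, hx]
    · have hcons : (x :: xs).filter (fun i => i != v) = x :: xs.filter (fun i => i != v) := by
        simp [hx]
      rw [hcons] at h
      have hxw : x = w := by simpa using h
      subst hxw
      rw [PySem.List.index?_cons_self]
      simp [cntEq, hx]

theorem filter_none_all (l : List Int) (v : Int)
    (h : (l.filter (fun i => i != v)).head? = none) : ∀ x ∈ l, x = v := by
  intro x hx
  by_contra hne
  have : x ∈ l.filter (fun i => i != v) := by
    simp [List.mem_filter, hx, hne]
  rcases this with _
  cases hh : l.filter (fun i => i != v) with
  | nil => simp [hh] at this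
  | cons y ys => simp [hh] at h

theorem cntEq_of_all (l : List Int) (v : Int) (h : ∀ x ∈ l, x = v) :
    cntEq v l = l.length := by
  induction l with
  | nil => simp [cntEq]
  | cons x xs ih =>
    have hx : x = v := h x (by simp)
    simp [cntEq, hx, ih fun y hy => h y (by simp [hy])]

theorem pvSym_lt {x y : Int} (h : x < y) : pvSym x y = '<' := by
  simp [pvSym, h, ne_of_lt h]

theorem pvSym_gt {x y : Int} (h : y < x) : pvSym x y = '>' := by
  have h1 : ¬ x = y := by omega
  have h2 : ¬ x < y := by omega
  simp [pvSym, h1, h2]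

theorem pvSym_self (x : Int) : pvSym x x = '=' := by simp [pvSym]

theorem pvSym_ne_lt {x y : Int} (h : ¬ x < y) : pvSym x y ≠ '<' := by
  unfold pvSym; split_ifs <;> decide

theorem pvSym_ne_gt {x y : Int} (h : ¬ y < x) : pvSym x y ≠ '>' := by
  unfold pvSym; split_ifs <;> first | decide | omega

theorem rle_cons_eq (a b : Int) (t : List Int) :
    rle (symsS (a :: b :: t)) =
      pvName (pvSym a b) (1 + clS (pvSym a b) (symsS (b :: t))) ::
        rle ((symsS (b :: t)).drop (clS (pvSym a b) (symsS (b :: t)))) := by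
  show rle (pvSym a b :: symsS (b :: t)) = _
  show rleChunk (pvSym a b) 1 (symsS (b :: t)) = _
  exact rleChunk_eq _ _ _

theorem goA_eq : ∀ (fuel : Nat) (tl : List String) (ol : List Int),
    ol.length ≤ fuel → goA fuel tl ol = tl ++ rle (symsS ol) := by
  intro fuel
  induction fuel with
  | zero =>
    intro tl ol h
    have hol : ol = [] := by cases ol <;> simp_all
    subst hol
    simp [goA, symsS, rle]
  | succ fuel ih =>
    intro tl ol h
    match ol with
    | [] => simp [goA, symsS, rle]
    | [a] => simp [goA, symsS, rle]
    | [a, b] =>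
      by_cases h1 : a = b
      · subst h1
        simp [goA, symsS, rle, rleChunk, pvSym_self, pvName]
      · by_cases h2 : a < b
        · have h3 : ¬ a > b := by omega
          simp [goA, h1, h3, symsS, rle, rleChunk, pvSym_lt h2, pvName]
        · have h3 : a > b := by omega
          simp [goA, h1, h3, symsS, rle, rleChunk, pvSym_gt (by omega : b < a), pvName]
    | a :: b :: c :: rest =>
      rw [rle_cons_eq]
      by_cases hab : a = b
      · -- flat branch
        subst hab
        rw [pvSym_self]
        cases hf : ((a :: a :: c :: rest).filter (fun i => i != a)).head? with
        | none =>
          -- everything equals a: rle's tail is empty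
          have hall : ∀ x ∈ (a :: a :: c :: rest), x = a := filter_none_all _ a hf
          have hcnt : cntEq a (c :: rest) = (c :: rest).length :=
            cntEq_of_all _ a fun x hx => hall x (by simp [hx])
          have hm : clS '=' (symsS (a :: c :: rest)) = (c :: rest).length := by
            rw [clS_eq_syms (c :: rest) a, hcnt]
          have hdrop : (symsS (a :: c :: rest)).drop (clS '=' (symsS (a :: c :: rest))) = [] := by
            rw [hm]
            exact List.drop_eq_nil_of_le (by rw [length_symsS])
          simp only [goA, hf, hdrop]
          simp [pvName, rle]
        | some v =>
          have hidx : PySem.List.index? (a :: a :: c :: rest) v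
              = some (cntEq a (a :: a :: c :: rest)) := index_filter_lemma _ a v hf
          set m := clS '=' (symsS (a :: c :: rest)) with hmdef
          have hm : cntEq a (a :: a :: c :: rest) = m + 2 := by
            rw [hmdef, clS_eq_syms (c :: rest) a]
            simp [cntEq]
          have hcast : ((((m + 2 : Nat) : Int)) - 1) = (((m + 1 : Nat) : Int)) := by
            push_cast; ring
          have hslice : PySem.List.slice (a :: a :: c :: rest)
              (some (((cntEq a (a :: a :: c :: rest) : Nat) : Int) - 1)) none
              = (a :: a :: c :: rest).drop (m + 1) := by
            rw [hm, hcast, PySem.List.slice_from_natCast]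
          have hrec := ih (tl ++ ["flat"]) ((a :: a :: c :: rest).drop (m + 1))
            (by simp at h ⊢; omega)
          have hsyms : symsS ((a :: a :: c :: rest).drop (m + 1))
              = (symsS (a :: c :: rest)).drop m := by
            rw [symsS_drop]
            show ((pvSym a a :: symsS (a :: c :: rest)).drop (m + 1)) = _
            simp
          simp only [goA, hf, hidx, hslice, hrec, hsyms]
          simp [pvName]
      · -- a ≠ b
        by_cases hlt : a < b
        · rw [pvSym_lt hlt]
          by_cases hbc : b < c
          · -- incline
            set m := clS '<' (symsS (b :: c :: rest)) with hmdef
            have hm1 : 1 ≤ m := by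
              rw [hmdef]
              show 1 ≤ clS '<' (pvSym b c :: symsS (c :: rest))
              rw [pvSym_lt hbc]
              simp [clS]
            have hrun : incRunA (a :: b :: c :: rest) = m + 1 := by
              rw [incRunA_eq]
              show clS '<' (pvSym a b :: symsS (b :: c :: rest)) = m + 1
              rw [pvSym_lt hlt]
              simp [clS, hmdef]
            have hslice : PySem.List.slice (a :: b :: c :: rest)
                (some ((incRunA (a :: b :: c :: rest) : Int))) none
                = (a :: b :: c :: rest).drop (m + 1) := by
              rw [hrun, PySem.List.slice_from_natCast]
            have hrec := ih (tl ++ ["incline"]) ((a :: b :: c :: rest).drop (m + 1))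
              (by simp at h ⊢; omega)
            have hsyms : symsS ((a :: b :: c :: rest).drop (m + 1))
                = (symsS (b :: c :: rest)).drop m := by
              rw [symsS_drop]
              show ((pvSym a b :: symsS (b :: c :: rest)).drop (m + 1)) = _
              simp
            have hname : pvName '<' (1 + m) = "incline" := by
              unfold pvName
              rw [if_neg (by decide), if_pos (by decide), if_pos (by omega)]
            simp only [goA, if_neg hab, if_pos hlt, if_pos hbc, hslice, hrec, hsyms, hname]
            simp
          · -- up
            have hm : clS '<' (symsS (b :: c :: rest)) = 0 := by
              show clS '<' (pvSym b c :: symsS (c :: rest)) = 0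
              simp [clS, pvSym_ne_lt hbc]
            have hrec := ih (tl ++ ["up"]) (b :: c :: rest) (by simp at h ⊢; omega)
            simp only [goA, if_neg hab, if_pos hlt, if_neg hbc, hrec, hm]
            simp [pvName, rle]
        · -- a > b
          have hgt : b < a := by omega
          rw [pvSym_gt hgt]
          by_cases hbc : c < b
          · -- decline
            set m := clS '>' (symsS (b :: c :: rest)) with hmdef
            have hm1 : 1 ≤ m := by
              rw [hmdef]
              show 1 ≤ clS '>' (pvSym b c :: symsS (c :: rest))
              rw [pvSym_gt hbc]
              simp [clS]
            have hrun : decRunA (a :: b :: c :: rest) = m + 1 := by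
              rw [decRunA_eq]
              show clS '>' (pvSym a b :: symsS (b :: c :: rest)) = m + 1
              rw [pvSym_gt hgt]
              simp [clS, hmdef]
            have hslice : PySem.List.slice (a :: b :: c :: rest)
                (some ((decRunA (a :: b :: c :: rest) : Int))) none
                = (a :: b :: c :: rest).drop (m + 1) := by
              rw [hrun, PySem.List.slice_from_natCast]
            have hrec := ih (tl ++ ["decline"]) ((a :: b :: c :: rest).drop (m + 1))
              (by simp at h ⊢; omega)
            have hsyms : symsS ((a :: b :: c :: rest).drop (m + 1))
                = (symsS (b :: c :: rest)).drop m := by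
              rw [symsS_drop]
              show ((pvSym a b :: symsS (b :: c :: rest)).drop (m + 1)) = _
              simp
            have hname : pvName '>' (1 + m) = "decline" := by
              unfold pvName
              rw [if_neg (by decide), if_neg (by decide), if_pos (by omega)]
            simp only [goA, if_neg hab, if_neg hlt, if_pos hbc, hslice, hrec, hsyms, hname]
            simp
          · -- down
            have hm : clS '>' (symsS (b :: c :: rest)) = 0 := by
              show clS '>' (pvSym b c :: symsS (c :: rest)) = 0
              simp [clS, pvSym_ne_gt hbc]
            have hrec := ih (tl ++ ["down"]) (b :: c :: rest) (by simp at h ⊢; omega)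
            simp only [goA, if_neg hab, if_neg hlt, if_neg hbc, hrec, hm]
            simp [pvName, rle]

-- ===== VERDICT (by name: the statement is the Claim_ definition above) =====
theorem find_trends_spec : Claim_equal_find_trends := by
  intro data _
  unfold Spec_find_trends find_trends
  rw [goA_eq (data.length + 1) [] data (by omega), alt_eq_rle]
  simp
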